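-- pv_equiv track=rewrite | github.com/JunseoChoJJ/codeSignalSolutions | Arcade/Core/HouseOfCats.py | solution
-- ===== SOURCE A (Python) =====
-- def solution(legs):
--     ans = []
--
--
--     if legs == 2:
--         ans.append(1)
--         return ans
--
--     if legs % 4 == 0:
--         for i in range(0, legs // 2 + 1, 2):
--             ans.append(i)
--     else:
--         for i in range(1,legs // 2 + 1, 2):
--             ans.append(i)
--
--     return ans
--
--     '''
--     best voted solution
--     return list(range(legs // 2 % 2, legs // 2 + 1, 2))
--
--     '''
-- ===== SOURCE B (Python) =====
-- def solution(legs):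
--     # Build the answer back-to-front: start at the largest element of the
--     # progression and step down by 2, then reverse once at the end.
--     top = legs // 2
--     if legs % 4 == 1:
--         top -= 1
--     res = []
--     while top >= 0:
--         res.append(top)
--         top -= 2
--     res.reverse()
--     return res
-- ===== Notes on version B (the rewrite author's own statement) =====
-- stated objective: alternative
-- what changed: Replaces A's special-cased pair of ascending append loops (selected by a divisibility branch, plus a hard-coded answer for legs==2) with a back-to-front construction: one descending while-loop from the progression's top element stepping down by 2, followed by a single reverse.
import Mathlib
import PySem

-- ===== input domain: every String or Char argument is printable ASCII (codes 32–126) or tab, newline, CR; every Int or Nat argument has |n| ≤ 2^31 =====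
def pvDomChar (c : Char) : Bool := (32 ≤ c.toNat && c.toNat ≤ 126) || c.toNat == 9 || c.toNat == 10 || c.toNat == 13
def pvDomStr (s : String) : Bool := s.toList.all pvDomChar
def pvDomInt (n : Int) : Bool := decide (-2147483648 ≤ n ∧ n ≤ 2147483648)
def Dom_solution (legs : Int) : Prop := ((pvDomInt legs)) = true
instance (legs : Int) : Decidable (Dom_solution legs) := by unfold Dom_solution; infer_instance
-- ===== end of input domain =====

-- B builds the list back-to-front (descending loop from the top element, one final reverse)
-- instead of A's special case plus two ascending append loops; objective: alternative decomposition.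

-- ===== PORT A =====
def solution (legs : Int) : List Int :=
  let ans : List Int := []
  if legs == 2 then ans ++ [1]
  else if PySem.Int.mod legs 4 == 0 then
    (PySem.List.pyRange 0 (PySem.Int.floordiv legs 2 + 1) 2).foldl (fun a i => a ++ [i]) ans
  else
    (PySem.List.pyRange 1 (PySem.Int.floordiv legs 2 + 1) 2).foldl (fun a i => a ++ [i]) ans

-- ===== PORT B =====
-- while top >= 0: res.append(top); top -= 2   (fuel bounds the countdown so the
-- recursion is structural; the guard 0 ≤ t is the loop condition itself)
def bLoop : Nat → Int → List Int → List Int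
  | 0, _, res => res
  | fuel + 1, t, res => if 0 ≤ t then bLoop fuel (t - 2) (res ++ [t]) else res

def solution_alt (legs : Int) : List Int :=
  let top : Int :=
    PySem.Int.floordiv legs 2 - (if PySem.Int.mod legs 4 == 1 then 1 else 0)
  (bLoop (top + 2).toNat top []).reverse

-- ===== PRECONDITION & SPEC =====
def Spec_solution (legs : Int) (out : List Int) : Prop := out = solution_alt legs
instance (legs : Int) (out : List Int) : Decidable (Spec_solution legs out) := by unfold Spec_solution; infer_instance

-- ===== CLAIM (what is proved, stated in full; the proofs are below) =====
def Claim_equal_solution : Prop := ∀ (legs : Int), Dom_solution legs → Spec_solution legs (solution legs)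

-- ===== LEMMAS AND PROOFS =====

theorem foldl_snoc_id (l acc : List Int) : l.foldl (fun a i => a ++ [i]) acc = acc ++ l := by
  induction l generalizing acc <;> simp_all

theorem pyRange_two_nil (a b : Int) (h : b ≤ a) : PySem.List.pyRange a b 2 = [] := by
  rw [PySem.List.pyRange_of_pos a b (by norm_num)]
  rw [if_neg (by omega)]
  simp

-- append the top element: range(r, t+1, 2) = range(r, t-1, 2) ++ [t]  (r = t % 2, 0 ≤ t)
theorem pyRange_two_snoc (t : Int) (h : 0 ≤ t) :
    PySem.List.pyRange (t % 2) (t + 1) 2 = PySem.List.pyRange (t % 2) (t - 1) 2 ++ [t] := by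
  rw [PySem.List.pyRange_of_pos _ _ (by norm_num), PySem.List.pyRange_of_pos _ _ (by norm_num)]
  have hr0 : 0 ≤ t % 2 := by omega
  have hr1 : t % 2 ≤ t := by omega
  rw [if_pos (by omega)]
  by_cases hq : t % 2 < t - 1
  · rw [if_pos hq]
    have hc : ((t + 1 - t % 2 + 2 - 1) / 2).toNat = ((t - 1 - t % 2 + 2 - 1) / 2).toNat + 1 := by
      omega
    rw [hc, List.range_succ, List.map_append]
    congr 1
    simp only [List.map_cons, List.map_nil]
    congr 1
    omega
  · rw [if_neg hq]
    have hc : ((t + 1 - t % 2 + 2 - 1) / 2).toNat = 1 := by omega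
    rw [hc]
    simp only [List.range_one, List.map_cons, List.map_nil, List.range_zero, List.nil_append]
    congr 1
    omega

theorem bLoop_eq (fuel : Nat) (t : Int) (res : List Int) (h : t < (fuel : Int)) :
    bLoop fuel t res = res ++ (PySem.List.pyRange (t % 2) (t + 1) 2).reverse := by
  induction fuel generalizing t res with
  | zero =>
      have : t < 0 := by exact_mod_cast h
      rw [bLoop, pyRange_two_nil _ _ (by omega)]
      simp
  | succ n ih =>
      rw [bLoop]
      by_cases ht : 0 ≤ t
      · rw [if_pos ht, ih (t - 2) (res ++ [t]) (by omega)]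
        have hm : (t - 2) % 2 = t % 2 := by omega
        have hb : t - 2 + 1 = t - 1 := by ring
        rw [hm, hb, pyRange_two_snoc t ht]
        simp
      · rw [if_neg ht, pyRange_two_nil _ _ (by omega)]
        simp

-- two step-2 ranges with the same start and the same element count are equal
theorem pyRange_two_congr (a b b' : Int)
    (h : (if a < b then ((b - a + 2 - 1) / 2).toNat else 0)
       = (if a < b' then ((b' - a + 2 - 1) / 2).toNat else 0)) :
    PySem.List.pyRange a b 2 = PySem.List.pyRange a b' 2 := by
  rw [PySem.List.pyRange_of_pos a b (by norm_num),
      PySem.List.pyRange_of_pos a b' (by norm_num), h]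

-- ===== VERDICT (by name: the statement is the Claim_ definition above) =====
theorem solution_spec : Claim_equal_solution := by
  intro legs _
  have hm4 : PySem.Int.mod legs 4 = legs % 4 :=
    PySem.Int.mod_eq_emod_of_pos (by norm_num)
  have hd2 : PySem.Int.floordiv legs 2 = legs / 2 :=
    PySem.Int.floordiv_eq_ediv_of_pos (by norm_num)
  unfold Spec_solution solution solution_alt
  simp only [hm4, hd2, beq_iff_eq, List.nil_append]
  split_ifs with h2 ha hb hc hd
  all_goals try omega
  · -- legs = 2
    subst h2; decide
  · -- legs % 4 = 0, top = legs / 2 - 0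
    rw [bLoop_eq ((legs / 2 - 0 + 2).toNat) (legs / 2 - 0) [] (by omega),
        List.nil_append, List.reverse_reverse, foldl_snoc_id, List.nil_append]
    have hp : (legs / 2 - 0) % 2 = 0 := by omega
    rw [hp]
    apply pyRange_two_congr
    split_ifs <;> omega
  · -- legs % 4 = 1, top = legs / 2 - 1
    rw [bLoop_eq ((legs / 2 - 1 + 2).toNat) (legs / 2 - 1) [] (by omega),
        List.nil_append, List.reverse_reverse, foldl_snoc_id, List.nil_append]
    have hp : (legs / 2 - 1) % 2 = 1 := by omega
    rw [hp]
    apply pyRange_two_congr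
    split_ifs <;> omega
  · -- legs % 4 ∈ {2, 3}, top = legs / 2 - 0
    rw [bLoop_eq ((legs / 2 - 0 + 2).toNat) (legs / 2 - 0) [] (by omega),
        List.nil_append, List.reverse_reverse, foldl_snoc_id, List.nil_append]
    have hp : (legs / 2 - 0) % 2 = 1 := by omega
    rw [hp]
    apply pyRange_two_congr
    split_ifs <;> omega
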